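-- pv_equiv track=rewrite | github.com/blakexcosta/scrabble_scorer | scrabble_scorer.py | vowel_bonus_scorer
-- ===== SOURCE A (Python) =====
-- def vowel_bonus_scorer(word):
--     score = 0
--     vowels = ['a', 'e', 'i', 'o', 'u']
--     for char in word.lower():
--         if(char in vowels):
--             score += 3
--         else:
--             score += 1
--     return score
-- ===== SOURCE B (Python) =====
-- def vowel_bonus_scorer(word):
--     letters = list(word.lower())
--     bonus = 0
--     for v in "aeiou":
--         bonus += letters.count(v)
--     return len(letters) + 2 * bonus
-- ===== Notes on version B (the rewrite author's own statement) =====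
-- stated objective: alternative
-- what changed: Inverts the loop structure: instead of A's single per-character pass with a 3-or-1 branch, B loops over the five vowels, counts each vowel's occurrences with list.count, and returns the closed form len + 2*vowel_count (1 point per letter plus a 2-point bonus per vowel).
import Mathlib
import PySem

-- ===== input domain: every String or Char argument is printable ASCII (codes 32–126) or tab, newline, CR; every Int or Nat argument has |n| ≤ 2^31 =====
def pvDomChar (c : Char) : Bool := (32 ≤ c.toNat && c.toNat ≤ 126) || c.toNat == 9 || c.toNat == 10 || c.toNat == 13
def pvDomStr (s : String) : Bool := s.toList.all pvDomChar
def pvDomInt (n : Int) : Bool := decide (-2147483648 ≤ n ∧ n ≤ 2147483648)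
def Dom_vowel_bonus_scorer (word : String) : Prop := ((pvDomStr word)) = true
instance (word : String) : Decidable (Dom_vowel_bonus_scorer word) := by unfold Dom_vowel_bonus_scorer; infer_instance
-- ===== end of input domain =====

-- B inverts the loop: it iterates over the five vowels counting each with list.count and returns len + 2*bonus, instead of A's per-character 3-or-1 accumulation (alternative decomposition, same cost).
-- ===== PORT A =====
def vowel_bonus_scorer (word : String) : Int :=
  (PySem.Str.lower word).toList.foldl
    (fun score char => if ['a','e','i','o','u'].contains char then score + 3 else score + 1) 0

-- ===== PORT B =====
-- B: loop over the vowels, count each in the lowered letters, then len + 2*bonus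
def vowel_bonus_scorer_alt (word : String) : Int :=
  let letters := (PySem.Str.lower word).toList
  let bonus := "aeiou".toList.foldl (fun b v => b + (PySem.List.count letters v : Int)) 0
  (letters.length : Int) + 2 * bonus

-- ===== PRECONDITION & SPEC =====
def Spec_vowel_bonus_scorer (word : String) (out : Int) : Prop := out = vowel_bonus_scorer_alt word
instance (word : String) (out : Int) : Decidable (Spec_vowel_bonus_scorer word out) := by unfold Spec_vowel_bonus_scorer; infer_instance

-- ===== CLAIM =====
def Claim_equal_vowel_bonus_scorer : Prop := ∀ (word : String), Dom_vowel_bonus_scorer word → Spec_vowel_bonus_scorer word (vowel_bonus_scorer word)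

-- ===== LEMMAS AND PROOFS =====
-- A's fold is len + 2 * (count of vowels), per character
theorem pv_fold_score (l : List Char) (acc : Int) :
    l.foldl (fun score char => if ['a','e','i','o','u'].contains char then score + 3 else score + 1) acc
      = acc + (l.length : Int) + 2 * (l.countP (fun c => ['a','e','i','o','u'].contains c) : Int) := by
  induction l generalizing acc with
  | nil => simp
  | cons c t ih =>
    simp only [List.foldl_cons, List.countP_cons, ih]
    split_ifs <;> push_cast <;> simp_all <;> ring

-- count over a nodup vowel list sums the individual character counts
theorem pv_countP_mem (vs : List Char) (h : vs.Nodup) (l : List Char) :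
    (l.countP (fun c => vs.contains c) : Int) = (vs.map (fun v => (l.count v : Int))).sum := by
  induction vs with
  | nil => simp
  | cons v t ih =>
    simp only [List.nodup_cons] at h
    have key : ∀ (l : List Char), l.countP (fun c => (v :: t).contains c)
        = l.count v + l.countP (fun c => t.contains c) := by
      intro l
      induction l with
      | nil => simp
      | cons x xs ihl =>
        rw [List.countP_cons, List.countP_cons, List.count_cons, ihl]
        by_cases hx : x = v <;> by_cases hm : x ∈ t <;>
          simp [hx, hm, h.1] <;> omega
    rw [List.map_cons, List.sum_cons, ← ih h.2]
    push_cast [key]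
    ring

-- B's fold over vowels is the sum of the counts
theorem pv_fold_counts (vs : List Char) (l : List Char) (acc : Int) :
    vs.foldl (fun b v => b + (l.count v : Int)) acc = acc + (vs.map (fun v => (l.count v : Int))).sum := by
  induction vs generalizing acc with
  | nil => simp
  | cons v t ih => simp [List.foldl_cons, ih, List.sum_cons]; ring

-- ===== VERDICT =====
theorem vowel_bonus_scorer_spec : Claim_equal_vowel_bonus_scorer := by
  intro word _
  unfold Spec_vowel_bonus_scorer vowel_bonus_scorer vowel_bonus_scorer_alt
  rw [pv_fold_score]
  show _ = ((PySem.Str.lower word).toList.length : Int) + 2 *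
    ("aeiou".toList.foldl (fun b v => b + (PySem.List.count (PySem.Str.lower word).toList v : Int)) 0)
  simp only [PySem.List.count]
  rw [pv_fold_counts, pv_countP_mem _ (by decide)]
  have hv : "aeiou".toList = ['a', 'e', 'i', 'o', 'u'] := rfl
  rw [hv]
  ring
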